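-- pv_equiv track=rewrite | github.com/WordPress/openverse | openverse_catalog/dags/providers/provider_api_scripts/science_museum.py | _get_year_ranges
-- ===== SOURCE A (Python) =====
-- def _get_year_ranges(final_year: int) -> list[tuple[int, int]]:
--     """
--     The Science Museum API currently raises a 400 when attempting to access
--     any page number higher than 50
--     (https://github.com/TheScienceMuseum/collectionsonline/issues/1470).
--
--     To avoid this, we ingest data for small ranges of years at a time,
--     in order to split the data into batches less than 50 pages each.
--     Because more recent data is more numerous, the length of the year
--     ranges decreases as they get closer to the current day.
--     """
--     # Start with some very large ranges for old data
--     year_ranges = [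
--         (0, 200),
--         (200, 1500),
--         (1500, 1750),
--     ]
--     # Add a range for every 25 years between 1750 and 1825
--     year_ranges.extend([(x, x + 25) for x in range(1750, 1825, 25)])
--     # Add a range for every 10 years between 1825 and 1925
--     year_ranges.extend([(x, x + 10) for x in range(1825, 1925, 10)])
--     # Add a range for every 5 years between 1925 and 'next year'
--     # relative to when the DAG is being run.
--     year_ranges.extend(
--         [(x, min(x + 5, final_year)) for x in range(1925, final_year, 5)]
--     )
--     return year_ranges
-- ===== SOURCE B (Python) =====
-- def _get_year_ranges(final_year: int) -> list[tuple[int, int]]: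
--     def _step(y: int) -> int:
--         if y < 200:
--             return 200
--         if y < 1500:
--             return 1300
--         if y < 1750:
--             return 250
--         if y < 1825:
--             return 25
--         if y < 1925:
--             return 10
--         return 5
--
--     year_ranges = []
--     x = 0
--     while x < 1925 or x < final_year:
--         nxt = x + _step(x)
--         year_ranges.append((x, nxt if x < 1925 else min(nxt, final_year)))
--         x = nxt
--     return year_ranges
-- ===== Notes on version B (the rewrite author's own statement) =====
-- stated objective: alternative
-- what changed: Replaces the hardcoded head list plus three separate range-comprehension extends with a single while-loop that walks forward through the years, deriving each range's width from a piecewise step-width function of the current year and clamping only the final fine-grained segment.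
import Mathlib
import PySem

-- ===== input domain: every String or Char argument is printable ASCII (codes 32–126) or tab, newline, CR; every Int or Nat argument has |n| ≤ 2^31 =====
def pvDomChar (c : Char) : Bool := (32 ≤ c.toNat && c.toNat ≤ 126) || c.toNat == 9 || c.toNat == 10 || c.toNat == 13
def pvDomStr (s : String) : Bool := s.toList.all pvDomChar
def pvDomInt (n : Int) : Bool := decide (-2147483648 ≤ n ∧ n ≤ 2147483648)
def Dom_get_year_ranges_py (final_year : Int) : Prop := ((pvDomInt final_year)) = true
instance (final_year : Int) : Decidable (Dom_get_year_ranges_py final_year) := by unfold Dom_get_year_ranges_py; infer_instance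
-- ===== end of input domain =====

-- B discovers the ranges incrementally with one while-loop driven by a piecewise
-- step-width function of the current year, instead of A's hardcoded head list plus
-- three range comprehensions (alternative decomposition, same cost).


-- ===== PORT A =====
def get_year_ranges_py (final_year : Int) : List (Int × Int) :=
  let year_ranges : List (Int × Int) := [(0, 200), (200, 1500), (1500, 1750)]
  let year_ranges := year_ranges ++ (PySem.List.pyRange 1750 1825 25).map (fun x => (x, x + 25))
  let year_ranges := year_ranges ++ (PySem.List.pyRange 1825 1925 10).map (fun x => (x, x + 10))
  let year_ranges := year_ranges ++ (PySem.List.pyRange 1925 final_year 5).map (fun x => (x, min (x + 5) final_year))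
  year_ranges

-- ===== PORT B =====
-- _step from Source B
def pvStep (y : Int) : Int :=
  if y < 200 then 200
  else if y < 1500 then 1300
  else if y < 1750 then 250
  else if y < 1825 then 25
  else if y < 1925 then 10
  else 5

theorem pvStep_pos (y : Int) : 0 < pvStep y := by
  unfold pvStep; split_ifs <;> norm_num

-- the while loop of Source B (x, out are the loop state)
def pvLoop (final_year x : Int) (out : List (Int × Int)) : List (Int × Int) :=
  if _h : x < 1925 ∨ x < final_year then
    let nxt := x + pvStep x
    pvLoop final_year nxt (out ++ [(x, if x < 1925 then nxt else min nxt final_year)])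
  else out
termination_by (max 1925 final_year - x).toNat
decreasing_by
  have := pvStep_pos x
  omega

def get_year_ranges_py_alt (final_year : Int) : List (Int × Int) :=
  pvLoop final_year 0 []

-- ===== PRECONDITION & SPEC =====
def Spec_get_year_ranges_py (final_year : Int) (out : List (Int × Int)) : Prop := out = get_year_ranges_py_alt final_year
instance (final_year : Int) (out : List (Int × Int)) : Decidable (Spec_get_year_ranges_py final_year out) := by unfold Spec_get_year_ranges_py; infer_instance

-- ===== CLAIM (what is proved, stated in full; the proofs are below) =====
def Claim_equal_get_year_ranges_py : Prop := ∀ (final_year : Int), Dom_get_year_ranges_py final_year → Spec_get_year_ranges_py final_year (get_year_ranges_py final_year)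

-- ===== LEMMAS AND PROOFS =====

-- one loop step while still below 1925 (no clamp applies there)
theorem pvLoop_lt (final_year x : Int) (out : List (Int × Int)) (h : x < 1925) :
    pvLoop final_year x out
      = pvLoop final_year (x + pvStep x) (out ++ [(x, x + pvStep x)]) := by
  rw [pvLoop]
  simp [h]

-- cons form of a positive-step-5 range
theorem pyRange_five_cons (a b : Int) (h : a < b) :
    PySem.List.pyRange a b 5 = a :: PySem.List.pyRange (a + 5) b 5 := by
  rw [PySem.List.pyRange_of_pos a b (by norm_num),
      PySem.List.pyRange_of_pos (a + 5) b (by norm_num)]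
  by_cases h5 : a + 5 < b
  · have hc : ((b - a + 5 - 1) / 5).toNat = ((b - (a + 5) + 5 - 1) / 5).toNat + 1 := by omega
    simp only [if_pos h, if_pos h5, hc, List.range_succ_eq_map, List.map_cons, List.map_map]
    congr 1
    · norm_num
    · apply List.map_congr_left; intro k _; simp [Function.comp]; ring
  · have hc : ((b - a + 5 - 1) / 5).toNat = 1 := by omega
    simp [if_pos h, if_neg h5, hc, List.range_succ]

-- from 1925 on, the loop produces exactly A's clamped 5-year comprehension
theorem pvLoop_tail (final_year x : Int) (out : List (Int × Int)) (hx : 1925 ≤ x) :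
    pvLoop final_year x out
      = out ++ (PySem.List.pyRange x final_year 5).map (fun t => (t, min (t + 5) final_year)) := by
  by_cases h : x < final_year
  · have hstep : pvStep x = 5 := by unfold pvStep; split_ifs <;> omega
    rw [pvLoop]
    simp only [dif_pos (Or.inr h), hstep, if_neg (by omega : ¬ x < 1925)]
    rw [pvLoop_tail final_year (x + 5) _ (by omega), pyRange_five_cons x final_year h]
    simp
  · rw [pvLoop, PySem.List.pyRange_of_pos x final_year (by norm_num)]
    simp only [dif_neg (by omega : ¬ (x < 1925 ∨ x < final_year)), if_neg h]
    simp
termination_by (final_year - x).toNat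
decreasing_by omega

-- ===== VERDICT (by name: the statement is the Claim_ definition above) =====
set_option maxRecDepth 10000 in
theorem get_year_ranges_py_spec : Claim_equal_get_year_ranges_py := by
  intro final_year _
  show get_year_ranges_py final_year = get_year_ranges_py_alt final_year
  unfold get_year_ranges_py get_year_ranges_py_alt
  -- unroll B's loop through the sub-1925 prefix
  have e : pvLoop final_year 0 [] = pvLoop final_year 1925
      ([(0, 200), (200, 1500), (1500, 1750),
        (1750, 1775), (1775, 1800), (1800, 1825),
        (1825, 1835), (1835, 1845), (1845, 1855), (1855, 1865), (1865, 1875),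
        (1875, 1885), (1885, 1895), (1895, 1905), (1905, 1915), (1915, 1925)]) := by
    rw [pvLoop_lt _ _ _ (by norm_num)]; norm_num [pvStep]
    rw [pvLoop_lt _ _ _ (by norm_num)]; norm_num [pvStep]
    rw [pvLoop_lt _ _ _ (by norm_num)]; norm_num [pvStep]
    rw [pvLoop_lt _ _ _ (by norm_num)]; norm_num [pvStep]
    rw [pvLoop_lt _ _ _ (by norm_num)]; norm_num [pvStep]
    rw [pvLoop_lt _ _ _ (by norm_num)]; norm_num [pvStep]
    rw [pvLoop_lt _ _ _ (by norm_num)]; norm_num [pvStep]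
    rw [pvLoop_lt _ _ _ (by norm_num)]; norm_num [pvStep]
    rw [pvLoop_lt _ _ _ (by norm_num)]; norm_num [pvStep]
    rw [pvLoop_lt _ _ _ (by norm_num)]; norm_num [pvStep]
    rw [pvLoop_lt _ _ _ (by norm_num)]; norm_num [pvStep]
    rw [pvLoop_lt _ _ _ (by norm_num)]; norm_num [pvStep]
    rw [pvLoop_lt _ _ _ (by norm_num)]; norm_num [pvStep]
    rw [pvLoop_lt _ _ _ (by norm_num)]; norm_num [pvStep]
    rw [pvLoop_lt _ _ _ (by norm_num)]; norm_num [pvStep]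
    rw [pvLoop_lt _ _ _ (by norm_num)]; norm_num [pvStep]
  rw [e, pvLoop_tail final_year 1925 _ (by norm_num)]
  -- evaluate A's two fixed middle comprehensions to literals
  have h25 : (PySem.List.pyRange 1750 1825 25).map (fun x => (x, x + 25))
      = [((1750:Int), (1775:Int)), (1775, 1800), (1800, 1825)] := by decide
  have h10 : (PySem.List.pyRange 1825 1925 10).map (fun x => (x, x + 10))
      = [((1825:Int), (1835:Int)), (1835, 1845), (1845, 1855), (1855, 1865), (1865, 1875),
         (1875, 1885), (1885, 1895), (1895, 1905), (1905, 1915), (1915, 1925)] := by decide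
  rw [h25, h10]
  simp
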